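-- pv_equiv track=rewrite | github.com/Zeronus/cs-archive | Assignment 6 Programming Python/t2048.py | doKeyLeft
-- ===== SOURCE A (Python) =====
-- def doKeyLeft(board):
--     new_board = []
--     for row in board:
--         lst = []
--         count = 0
--
--         for i in range(len(row)):
--             if row[i] == ' ':
--                 count += 1
--             else:
--                 lst.append(row[i])
--         for x in range(count):
--             lst.append(' ')
--
--         index = 1
--
--         while index < len(lst):
--             if lst[index] == ' ':
--                 break
--             if lst[index-1] == lst[index]:
--                 new_value = int(lst[index]) + int(lst[index-1])
--                 lst[index] = str(new_value)
--                 lst[index-1] = ' '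
--             index += 1
--
--         ans = []
--         count2 = 0
--
--         for i in range(len(lst)):
--             if lst[i] == ' ':
--                 count2 += 1
--             else:
--                 ans.append(lst[i])
--         for x in range(count2):
--             ans.append(' ')
--         new_board.append(ans)
--     if new_board == board:
--         return False,new_board
--     else:
--         return True,new_board
-- ===== SOURCE B (Python) =====
-- def doKeyLeft(board):
--     new_board = []
--     for row in board:
--         result = []
--         for t in row:
--             if t == ' ':
--                 continue
--             if result and result[-1] == t:
--                 result[-1] = str(int(result[-1]) + int(t))
--             else:
--                 result.append(t)
--         result += [' '] * (len(row) - len(result))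
--         new_board.append(result)
--     return new_board != board, new_board
-- ===== Notes on version B (the rewrite author's own statement) =====
-- stated objective: simpler
-- what changed: Replaces A's three passes per row (compact with a space counter, an index-based in-place cascading merge over the padded array, then a second compact pass) by one pass that skips spaces and merges each tile into the top of a result stack, then pads once.
import Mathlib
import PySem

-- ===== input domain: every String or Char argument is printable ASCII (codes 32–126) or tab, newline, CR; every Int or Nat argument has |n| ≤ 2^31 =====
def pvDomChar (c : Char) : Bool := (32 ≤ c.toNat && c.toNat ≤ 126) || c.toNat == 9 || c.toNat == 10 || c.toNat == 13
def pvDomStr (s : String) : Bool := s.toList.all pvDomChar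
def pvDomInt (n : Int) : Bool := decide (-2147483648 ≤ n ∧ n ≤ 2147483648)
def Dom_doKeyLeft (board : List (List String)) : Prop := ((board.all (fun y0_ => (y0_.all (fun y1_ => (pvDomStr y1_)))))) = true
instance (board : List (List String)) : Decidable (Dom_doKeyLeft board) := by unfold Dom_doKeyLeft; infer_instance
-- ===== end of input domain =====

-- B replaces A's three passes per row (compact, index-based in-place cascading merge, re-compact)
-- by a single pass that merges each tile into the top of a result stack, then pads once (objective: simpler).


-- int(s), total form: under Pre_ every int() A or B performs succeeds, so the default is never read
def pvIntD (s : String) : Int := (PySem.Int.ofStr? s).getD 0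

-- ===== PORT A =====
-- A's first/third loop pair of each row: collect non-spaces counting spaces, then append that many spaces
def pvCompactA (row : List String) : List String :=
  let st := row.foldl
    (fun (st : List String × Nat) c => if c = " " then (st.1, st.2 + 1) else (st.1 ++ [c], st.2))
    ([], 0)
  (List.range st.2).foldl (fun l _ => l ++ [" "]) st.1

-- A's while-loop: index walks right, merging lst[index-1]==lst[index] in place
def pvMergeA (lst : List String) (index : Nat) : List String :=
  if h : index < lst.length then
    if PySem.List.pyGetD lst (index : Int) "" = " " then lst
    else if PySem.List.pyGetD lst ((index : Int) - 1) "" = PySem.List.pyGetD lst (index : Int) "" then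
      let nv := pvIntD (PySem.List.pyGetD lst (index : Int) "") + pvIntD (PySem.List.pyGetD lst ((index : Int) - 1) "")
      let lst1 := PySem.List.pySetD lst (index : Int) (PySem.Int.toStr nv)
      let lst2 := PySem.List.pySetD lst1 ((index : Int) - 1) " "
      pvMergeA lst2 (index + 1)
    else pvMergeA lst (index + 1)
  else lst
termination_by lst.length - index
decreasing_by all_goals first
  | (simp [PySem.List.length_pySetD]; omega)
  | omega

def doKeyLeft (board : List (List String)) : Bool × List (List String) :=
  let new_board := board.foldl (fun nb row => nb ++ [pvCompactA (pvMergeA (pvCompactA row) 1)]) []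
  if new_board = board then (false, new_board) else (true, new_board)

-- ===== PORT B =====
-- one step of Source B's row loop: skip spaces, merge equal tiles into result[-1], else append
def pvStepB (result : List String) (t : String) : List String :=
  if t = " " then result
  else match result.getLast? with
    | some p => if p = t then result.dropLast ++ [PySem.Int.toStr (pvIntD p + pvIntD t)] else result ++ [t]
    | none => result ++ [t]

def pvRowB (row : List String) : List String :=
  let result := row.foldl pvStepB []
  result ++ List.replicate (row.length - result.length) " "

def doKeyLeft_alt (board : List (List String)) : Bool × List (List String) :=
  let new_board := board.map pvRowB
  (decide (new_board ≠ board), new_board)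

-- ===== PRECONDITION & SPEC =====
-- Pre_ excludes exactly the boards on which Python A raises ValueError: some row's space-filtered
-- tile list has two equal adjacent entries that int() cannot parse (Python B raises the same there).
def Pre_doKeyLeft (board : List (List String)) : Prop :=
  ∀ row ∈ board, ∀ pr ∈ (row.filter (fun t => decide ¬(t = " "))).zip (row.filter (fun t => decide ¬(t = " "))).tail,
    pr.1 = pr.2 → (PySem.Int.ofStr? pr.1).isSome
instance (board : List (List String)) : Decidable (Pre_doKeyLeft board) := by unfold Pre_doKeyLeft; infer_instance
def pvWitness_doKeyLeft : List (List String) := [["2", "2", " "], [" ", "4", "x"]]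

def Spec_doKeyLeft (board : List (List String)) (out : Bool × List (List String)) : Prop := out = doKeyLeft_alt board
instance (board : List (List String)) (out : Bool × List (List String)) : Decidable (Spec_doKeyLeft board out) := by unfold Spec_doKeyLeft; infer_instance

-- ===== CLAIM (what is proved, stated in full; the proofs are below) =====
def Claim_equal_doKeyLeft : Prop := ∀ (board : List (List String)), Dom_doKeyLeft board → Pre_doKeyLeft board → Spec_doKeyLeft board (doKeyLeft board)

-- ===== LEMMAS AND PROOFS =====

-- A's cascading while-loop, rephrased on the part of the list right of the frozen prefix:
-- prev is lst[index-1], rest is lst[index:]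
def pvProc (prev : String) (rest : List String) : List String :=
  match rest with
  | [] => [prev]
  | t :: r =>
    if t = " " then prev :: t :: r
    else if prev = t then " " :: pvProc (PySem.Int.toStr (pvIntD t + pvIntD prev)) r
    else prev :: pvProc t r

theorem pv_digitChar_ne_space (k : Nat) : Nat.digitChar k ≠ ' ' := by
  by_cases h : k < 16
  · interval_cases k <;> decide
  · have h0 : Nat.digitChar k = '*' := by
      unfold Nat.digitChar
      rw [if_neg (by omega), if_neg (by omega), if_neg (by omega), if_neg (by omega),
          if_neg (by omega), if_neg (by omega), if_neg (by omega), if_neg (by omega),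
          if_neg (by omega), if_neg (by omega), if_neg (by omega), if_neg (by omega),
          if_neg (by omega), if_neg (by omega), if_neg (by omega), if_neg (by omega)]
    rw [h0]; decide

theorem pv_toDigitsCore_ne_space (b : Nat) (f n : Nat) (ds : List Char)
    (hds : ' ' ∉ ds) : ' ' ∉ Nat.toDigitsCore b f n ds := by
  induction f generalizing n ds with
  | zero => rw [Nat.toDigitsCore.eq_1]; exact hds
  | succ f ih =>
    rw [Nat.toDigitsCore.eq_2]
    have hcons : ' ' ∉ (n % b).digitChar :: ds := by
      intro hmem
      rcases List.mem_cons.mp hmem with h | h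
      · exact pv_digitChar_ne_space _ h.symm
      · exact hds h
    split_ifs
    · exact hcons
    · exact ih _ _ hcons

theorem pv_toStr_ne_space (n : Int) : PySem.Int.toStr n ≠ " " := by
  intro h
  have h' : (PySem.Int.toStr n).toList = (" " : String).toList := by rw [h]
  rw [PySem.Int.toList_toStr] at h'
  have hmem : ' ' ∈ PySem.Int.toChars n := by rw [h']; simp
  unfold PySem.Int.toChars at hmem
  split at hmem
  · rcases List.mem_cons.mp hmem with h | h
    · exact absurd h (by decide)
    · exact pv_toDigitsCore_ne_space _ _ _ _ (by simp) h
  · exact pv_toDigitsCore_ne_space _ _ _ _ (by simp) hmem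

theorem pv_appendSpaces (n : Nat) (l : List String) :
    (List.range n).foldl (fun l _ => l ++ [" "]) l = l ++ List.replicate n " " := by
  induction n with
  | zero => simp
  | succ n ih => rw [List.range_succ]; simp [ih, List.replicate_succ']

theorem pv_compact_fold (row : List String) (acc : List String) (n : Nat) :
    row.foldl (fun (st : List String × Nat) c => if c = " " then (st.1, st.2 + 1) else (st.1 ++ [c], st.2)) (acc, n)
      = (acc ++ row.filter (fun t => decide ¬(t = " ")), n + row.countP (fun t => decide (t = " "))) := by
  induction row generalizing acc n with
  | nil => simp
  | cons c row ih =>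
    by_cases h : c = " "
    · simp [h, ih, Nat.add_comm, Nat.add_assoc, Nat.add_left_comm]
    · simp [h, ih]

theorem pv_compactA_eq (row : List String) :
    pvCompactA row = row.filter (fun t => decide ¬(t = " "))
      ++ List.replicate (row.countP (fun t => decide (t = " "))) " " := by
  unfold pvCompactA
  rw [pv_compact_fold, pv_appendSpaces]
  simp

theorem pv_getD_mid (pre : List String) (x : String) (rest : List String) (d : String) :
    (pre ++ x :: rest).getD pre.length d = x := by
  induction pre with
  | nil => simp
  | cons a pre ih => simpa using ih

theorem pv_set_mid (pre : List String) (x : String) (rest : List String) (v : String) :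
    (pre ++ x :: rest).set pre.length v = pre ++ v :: rest := by
  induction pre with
  | nil => simp
  | cons a pre ih => simpa using ih

theorem pv_mergeA_proc (rest : List String) (prev : String) (pre : List String) :
    pvMergeA (pre ++ prev :: rest) (pre.length + 1) = pre ++ pvProc prev rest := by
  induction rest generalizing prev pre with
  | nil =>
    rw [pvMergeA]
    simp [pvProc]
  | cons t r ih =>
    rw [pvMergeA]
    have hlen : pre.length + 1 < (pre ++ prev :: t :: r).length := by simp
    have hcast : ((pre.length + 1 : Nat) : Int) - 1 = ((pre.length : Nat) : Int) := by push_cast; ring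
    have hget1 : PySem.List.pyGetD (pre ++ prev :: t :: r) ((pre.length + 1 : Nat) : Int) "" = t := by
      rw [PySem.List.pyGetD_natCast]
      have : pre ++ prev :: t :: r = (pre ++ [prev]) ++ t :: r := by simp
      rw [this]
      have := pv_getD_mid (pre ++ [prev]) t r ""
      simpa using this
    have hget0 : PySem.List.pyGetD (pre ++ prev :: t :: r) (((pre.length + 1 : Nat) : Int) - 1) "" = prev := by
      rw [hcast, PySem.List.pyGetD_natCast]
      exact pv_getD_mid pre prev (t :: r) ""
    rw [dif_pos hlen, hget1, hget0]
    by_cases ht : t = " "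
    · simp [ht, pvProc]
    · rw [if_neg ht]
      by_cases hpt : prev = t
      · rw [if_pos hpt]
        have hset1 : PySem.List.pySetD (pre ++ prev :: t :: r) ((pre.length + 1 : Nat) : Int)
            (PySem.Int.toStr (pvIntD t + pvIntD prev))
            = pre ++ prev :: PySem.Int.toStr (pvIntD t + pvIntD prev) :: r := by
          rw [PySem.List.pySetD_natCast]
          have : pre ++ prev :: t :: r = (pre ++ [prev]) ++ t :: r := by simp
          rw [this]
          have := pv_set_mid (pre ++ [prev]) t r (PySem.Int.toStr (pvIntD t + pvIntD prev))
          simpa using this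
        have hset0 : PySem.List.pySetD (pre ++ prev :: PySem.Int.toStr (pvIntD t + pvIntD prev) :: r)
            (((pre.length + 1 : Nat) : Int) - 1) " "
            = pre ++ " " :: PySem.Int.toStr (pvIntD t + pvIntD prev) :: r := by
          rw [hcast, PySem.List.pySetD_natCast]
          exact pv_set_mid pre prev (PySem.Int.toStr (pvIntD t + pvIntD prev) :: r) " "
        simp only [hset1, hset0]
        have hre : pre ++ " " :: PySem.Int.toStr (pvIntD t + pvIntD prev) :: r
            = (pre ++ [" "]) ++ PySem.Int.toStr (pvIntD t + pvIntD prev) :: r := by simp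
        have hlen2 : pre.length + 1 + 1 = (pre ++ [" "]).length + 1 := by simp
        rw [hre, hlen2, ih]
        simp [pvProc, ht, hpt]
      · rw [if_neg hpt]
        have hre : pre ++ prev :: t :: r = (pre ++ [prev]) ++ t :: r := by simp
        have hlen2 : pre.length + 1 + 1 = (pre ++ [prev]).length + 1 := by simp
        rw [hre, hlen2, ih]
        simp [pvProc, ht, hpt]

theorem pv_proc_length (rest : List String) (prev : String) :
    (pvProc prev rest).length = rest.length + 1 := by
  induction rest generalizing prev with
  | nil => simp [pvProc]
  | cons t r ih => unfold pvProc; split_ifs <;> simp [ih]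

theorem pv_proc_spaces (ts : List String) (prev : String) (k : Nat)
    (hts : ∀ t ∈ ts, ¬(t = " ")) :
    pvProc prev (ts ++ List.replicate k " ") = pvProc prev ts ++ List.replicate k " " := by
  induction ts generalizing prev with
  | nil =>
    cases k with
    | zero => simp
    | succ k => simp [pvProc, List.replicate_succ]
  | cons t r ih =>
    have ht : ¬(t = " ") := hts t (by simp)
    have hr : ∀ u ∈ r, ¬(u = " ") := fun u hu => hts u (by simp [hu])
    unfold pvProc
    simp only [List.cons_append]
    rw [if_neg ht, if_neg ht]
    by_cases hpt : prev = t
    · rw [if_pos hpt, if_pos hpt, ih _ hr]; simp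
    · rw [if_neg hpt, if_neg hpt, ih _ hr]; simp

theorem pv_stepB_ne_nil (st : List String) (t : String) (h : st ≠ []) : pvStepB st t ≠ [] := by
  unfold pvStepB
  split_ifs with h1
  · exact h
  · cases hl : st.getLast? with
    | none => simp
    | some p => by_cases hpt : p = t <;> simp [hpt]

theorem pv_stepB_frozen (st : List String) (pre : List String) (t : String) (h : st ≠ []) :
    pvStepB (pre ++ st) t = pre ++ pvStepB st t := by
  unfold pvStepB
  by_cases ht : t = " "
  · simp [ht]
  · rw [if_neg ht, if_neg ht, List.getLast?_append_of_ne_nil pre h]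
    cases hl : st.getLast? with
    | none => exact absurd (List.getLast?_eq_none_iff.mp hl) h
    | some p =>
      by_cases hpt : p = t
      · simp [hpt, List.dropLast_append_of_ne_nil h]
      · simp [hpt]

theorem pv_foldl_frozen (ts : List String) (st : List String) (pre : List String) (h : st ≠ []) :
    List.foldl pvStepB (pre ++ st) ts = pre ++ List.foldl pvStepB st ts := by
  induction ts generalizing st with
  | nil => simp
  | cons t r ih =>
    simp only [List.foldl_cons]
    rw [pv_stepB_frozen st pre t h, ih _ (pv_stepB_ne_nil st t h)]

theorem pv_filter_proc (ts : List String) (prev : String)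
    (hprev : ¬(prev = " ")) (hts : ∀ t ∈ ts, ¬(t = " ")) :
    (pvProc prev ts).filter (fun t => decide ¬(t = " "))
      = List.foldl pvStepB [prev] ts := by
  induction ts generalizing prev with
  | nil => simp [pvProc, hprev]
  | cons t r ih =>
    have ht : ¬(t = " ") := hts t (by simp)
    have hr : ∀ u ∈ r, ¬(u = " ") := fun u hu => hts u (by simp [hu])
    unfold pvProc
    rw [if_neg ht]
    by_cases hpt : prev = t
    · subst hpt
      rw [if_pos rfl]
      have hstep : pvStepB [prev] prev = [PySem.Int.toStr (pvIntD prev + pvIntD prev)] := by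
        simp [pvStepB, ht]
      simp only [List.foldl_cons, hstep]
      rw [← ih (PySem.Int.toStr (pvIntD prev + pvIntD prev)) (pv_toStr_ne_space _) hr]
      simp
    · rw [if_neg hpt]
      have hstep : pvStepB [prev] t = [prev] ++ [t] := by
        simp [pvStepB, ht, hpt]
      simp only [List.foldl_cons, hstep]
      rw [pv_foldl_frozen r [t] [prev] (by simp)]
      rw [← ih t ht hr]
      simp [hprev]

theorem pv_foldl_skip (row : List String) (acc : List String) :
    List.foldl pvStepB acc row
      = List.foldl pvStepB acc (row.filter (fun t => decide ¬(t = " "))) := by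
  induction row generalizing acc with
  | nil => simp
  | cons t r ih =>
    by_cases ht : t = " "
    · subst ht
      have hst : pvStepB acc " " = acc := by simp [pvStepB]
      simp [hst, ih]
    · simp [ht, ih]

theorem pv_len_split (l : List String) :
    (l.filter (fun t => decide ¬(t = " "))).length + l.countP (fun t => decide (t = " ")) = l.length := by
  induction l with
  | nil => simp
  | cons t r ih => by_cases ht : t = " " <;> simp [ht, ← ih] <;> omega

theorem pv_row_eq (row : List String) :
    pvCompactA (pvMergeA (pvCompactA row) 1) = pvRowB row := by
  rw [pv_compactA_eq row]
  cases htiles : row.filter (fun t => decide ¬(t = " ")) with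
  | nil =>
    have hk : row.countP (fun t => decide (t = " ")) = row.length := by
      rw [List.countP_eq_length]
      intro t htmem
      by_contra hne
      have hmemf : t ∈ row.filter (fun t => decide ¬(t = " ")) := by
        rw [List.mem_filter]; exact ⟨htmem, by simpa using hne⟩
      rw [htiles] at hmemf
      simp at hmemf
    have hmerge : ∀ K : Nat, pvMergeA (List.replicate K " ") 1 = List.replicate K " " := by
      intro K
      match K with
      | 0 => rw [pvMergeA]; simp
      | 1 => rw [pvMergeA]; simp
      | (n+2) =>
        have he : List.replicate (n+2) " " = ([] : List String) ++ " " :: List.replicate (n+1) " " := by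
          simp [List.replicate_succ]
        have hm := pv_mergeA_proc (List.replicate (n+1) " ") " " []
        simp only [List.nil_append, List.length_nil, Nat.zero_add] at hm
        rw [he]
        simp only [List.nil_append]
        rw [hm]
        cases n with
        | zero => simp [pvProc, List.replicate_succ]
        | succ m => simp [pvProc, List.replicate_succ]
    simp only [List.nil_append]
    rw [hmerge, pv_compactA_eq]
    rw [List.filter_replicate, List.countP_replicate]
    simp only [pvRowB]
    rw [pv_foldl_skip row [], htiles]
    simp [hk]
  | cons p ts =>
    have hmemf : ∀ t ∈ p :: ts, ¬(t = " ") := by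
      intro t htmem
      have hmem2 : t ∈ row.filter (fun t => decide ¬(t = " ")) := by rw [htiles]; exact htmem
      simpa using (List.of_mem_filter hmem2)
    have hp : ¬(p = " ") := hmemf p (by simp)
    have hts : ∀ t ∈ ts, ¬(t = " ") := fun t htmem => hmemf t (by simp [htmem])
    simp only [List.cons_append]
    have hm := pv_mergeA_proc (ts ++ List.replicate (row.countP (fun t => decide (t = " "))) " ") p []
    simp only [List.nil_append, List.length_nil, Nat.zero_add] at hm
    rw [hm]
    rw [pv_proc_spaces ts p _ hts, pv_compactA_eq]
    have hfilter : (pvProc p ts ++ List.replicate (row.countP (fun t => decide (t = " "))) " ").filter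
        (fun t => decide ¬(t = " "))
        = List.foldl pvStepB [p] ts := by
      rw [List.filter_append, pv_filter_proc ts p hp hts, List.filter_replicate]
      simp
    have hcount : (pvProc p ts ++ List.replicate (row.countP (fun t => decide (t = " "))) " ").countP
        (fun t => decide (t = " "))
        = (pvProc p ts).countP (fun t => decide (t = " ")) + row.countP (fun t => decide (t = " ")) := by
      rw [List.countP_append, List.countP_replicate]
      simp
    rw [hfilter, hcount]
    simp only [pvRowB]
    rw [pv_foldl_skip row [], htiles]
    simp only [List.foldl_cons]
    have hstep0 : pvStepB [] p = [p] := by simp [pvStepB, hp]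
    rw [hstep0]
    have hlenM : (List.foldl pvStepB [p] ts).length
        = (pvProc p ts).length - (pvProc p ts).countP (fun t => decide (t = " ")) := by
      rw [← pv_filter_proc ts p hp hts]
      have := pv_len_split (pvProc p ts)
      omega
    have hrowlen : row.length = (ts.length + 1) + row.countP (fun t => decide (t = " ")) := by
      have hsplit := pv_len_split row
      rw [htiles] at hsplit
      simp at hsplit
      omega
    have hle : (pvProc p ts).countP (fun t => decide (t = " ")) ≤ (pvProc p ts).length := by
      have := pv_len_split (pvProc p ts)
      omega
    congr 1
    congr 1
    have hpl := pv_proc_length ts p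
    omega

theorem doKeyLeft_spec_aux (board : List (List String)) :
    doKeyLeft board = doKeyLeft_alt board := by
  simp only [doKeyLeft, doKeyLeft_alt]
  rw [PySem.List.foldl_append_singleton_eq_map (fun row => pvCompactA (pvMergeA (pvCompactA row) 1)) board []]
  simp only [List.nil_append]
  have hmap : board.map (fun row => pvCompactA (pvMergeA (pvCompactA row) 1)) = board.map pvRowB :=
    List.map_congr_left (fun row _ => pv_row_eq row)
  rw [hmap]
  by_cases h : board.map pvRowB = board <;> simp [h]

-- ===== VERDICT (by name: the statement is the Claim_ definition above) =====
theorem doKeyLeft_spec : Claim_equal_doKeyLeft := by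
  intro board _ _
  unfold Spec_doKeyLeft
  exact doKeyLeft_spec_aux board
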